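-- pv_equiv track=rewrite | github.com/ddbrx/triscore | base/translit.py | _convert_word
-- ===== SOURCE A (Python) =====
-- MAX_SUB_LENGTH = 3
--
-- def _convert_word(word, mapping, exceptions):
--     if word in exceptions:
--         return exceptions[word]
--
--     results = ['']
--     i = 0
--     while i < len(word):
--         subs = []
--         for length in reversed(range(1, 1 + MAX_SUB_LENGTH)):
--             subs.append(word[i:i+length])
--         found = False
--
--         for sub in subs:
--             if sub not in mapping:
--                 continue
--
--             new_results = []
--             for result in results:
--                 for option in mapping[sub]:
--                     new_results.append(result + option)
--             results = new_results
--             found = True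
--             i += len(sub)
--             break
--
--         if not found:
--             results = list(map(lambda result: result + word[i], results))
--             i += 1
--
--     return results
-- ===== SOURCE B (Python) =====
-- MAX_SUB_LENGTH = 3
--
-- def _convert_word(word, mapping, exceptions):
--     if word in exceptions:
--         return exceptions[word]
--
--     # pass 1: greedy parse into the per-position option lists, longest key first
--     options_seq = []
--     i = 0
--     n = len(word)
--     while i < n:
--         tri = word[i:i + 3]
--         duo = word[i:i + 2]
--         uno = word[i]
--         if tri in mapping:
--             options_seq.append(mapping[tri])
--             i += len(tri)
--         elif duo in mapping:
--             options_seq.append(mapping[duo])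
--             i += len(duo)
--         elif uno in mapping:
--             options_seq.append(mapping[uno])
--             i += 1
--         else:
--             options_seq.append([uno])
--             i += 1
--
--     # pass 2: build all combinations back to front (suffix products)
--     tails = ['']
--     for options in reversed(options_seq):
--         tails = [o + t for o in options for t in tails]
--     return tails
-- ===== Notes on version B (the rewrite author's own statement) =====
-- stated objective: alternative
-- what changed: B separates parsing from expansion: a forward loop with three explicit unrolled lookups (tri/duo/uno, instead of A's built candidate list scanned for the first mapping key) collects the option list per greedy-matched position, then a back-to-front loop over the reversed token list builds all suffix combinations, instead of A's interleaved rebuilding of every partial result while scanning.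
import Mathlib
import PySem

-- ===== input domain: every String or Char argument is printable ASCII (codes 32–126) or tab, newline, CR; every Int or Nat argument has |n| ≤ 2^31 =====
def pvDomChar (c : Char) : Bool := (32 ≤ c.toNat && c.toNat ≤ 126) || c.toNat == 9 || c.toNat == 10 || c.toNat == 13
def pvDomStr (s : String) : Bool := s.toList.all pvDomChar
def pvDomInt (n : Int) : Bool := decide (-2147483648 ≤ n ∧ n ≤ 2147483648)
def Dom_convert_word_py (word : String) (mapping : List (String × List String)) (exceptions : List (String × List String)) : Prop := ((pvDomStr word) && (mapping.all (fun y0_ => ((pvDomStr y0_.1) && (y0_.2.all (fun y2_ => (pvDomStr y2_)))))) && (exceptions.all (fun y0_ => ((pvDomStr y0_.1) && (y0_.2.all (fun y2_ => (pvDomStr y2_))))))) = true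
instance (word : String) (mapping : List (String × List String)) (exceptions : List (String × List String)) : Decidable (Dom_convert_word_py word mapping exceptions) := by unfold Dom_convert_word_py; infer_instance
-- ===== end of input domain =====

-- B separates parsing from expansion: a forward pass with explicit unrolled tri/duo/uno
-- lookups collects the option list per greedy-matched position, then a back-to-front pass
-- builds all suffix combinations, instead of A's interleaved rebuilding of every partial
-- result while scanning; alternative decomposition, same results.

-- ===== PORT A =====
-- A builds the candidate list subs = [word[i:i+3], word[i:i+2], word[i:i+1]] and scans it
-- for the first key of mapping (exact for the in-range nonnegative i of the loop, where the
-- slices are takes of the remaining tail t = word[i:]).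
def pvScan (mapping : List (String × List String)) : List (List Char) → Option (List Char × List String)
  | [] => none
  | s :: ss =>
    match (PySem.Dict.mk mapping).get? (String.ofList s) with
    | some opts => some (s, opts)
    | none => pvScan mapping ss

def pvFindSub (mapping : List (String × List String)) (t : List Char) : Option (List Char × List String) :=
  pvScan mapping [t.take 3, t.take 2, t.take 1]

-- needed for termination of A's loop: the matched sub is one of the candidate slices
theorem pvScan_mem (mapping : List (String × List String)) (subs : List (List Char))
    (sub : List Char) (opts : List String) (h : pvScan mapping subs = some (sub, opts)) :
    sub ∈ subs := by
  induction subs with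
  | nil => simp [pvScan] at h
  | cons s ss ih =>
    unfold pvScan at h
    cases hg : (PySem.Dict.mk mapping).get? (String.ofList s) with
    | some o => rw [hg] at h; simp at h; simp [h.1]
    | none => rw [hg] at h; exact List.mem_cons_of_mem _ (ih h)

-- needed for termination of A's loop: the matched sub is a nonempty slice of the tail
theorem pvFindSub_len (mapping : List (String × List String)) (c : Char) (rest : List Char)
    (sub : List Char) (opts : List String) (h : pvFindSub mapping (c :: rest) = some (sub, opts)) :
    0 < sub.length ∧ sub.length ≤ (c :: rest).length := by
  have hm := pvScan_mem mapping _ sub opts h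
  simp only [List.mem_cons, List.not_mem_nil, or_false] at hm
  rcases hm with h1 | h1 | h1 <;> subst h1 <;>
    constructor <;> simp [List.length_take]

-- A's while loop: results is rebuilt at every position
def pvLoopA (mapping : List (String × List String)) : List Char → List String → List String
  | [], results => results
  | c :: rest, results =>
    match h : pvFindSub mapping (c :: rest) with
    | some (sub, opts) =>
      pvLoopA mapping ((c :: rest).drop sub.length)
        (results.flatMap (fun result => opts.map (fun option => result ++ option)))
    | none => pvLoopA mapping rest (results.map (fun result => result ++ String.ofList [c]))
  termination_by t => t.length
  decreasing_by
  · have := pvFindSub_len mapping c rest sub opts h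
    simp; omega
  · simp

def convert_word_py (word : String) (mapping : List (String × List String)) (exceptions : List (String × List String)) : List String :=
  match (PySem.Dict.mk exceptions).get? word with
  | some v => v
  | none => pvLoopA mapping word.toList [""]

-- ===== PORT B =====
-- B's pass 1: greedy parse into the per-position option lists, the three candidate
-- lengths tried as explicit unrolled lookups (tri/duo/uno)
def pvTokensB (mapping : List (String × List String)) : List Char → List (List String)
  | [] => []
  | c :: rest =>
    match (PySem.Dict.mk mapping).get? (String.ofList ((c :: rest).take 3)) with
    | some opts => opts :: pvTokensB mapping ((c :: rest).drop ((c :: rest).take 3).length)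
    | none =>
      match (PySem.Dict.mk mapping).get? (String.ofList ((c :: rest).take 2)) with
      | some opts => opts :: pvTokensB mapping ((c :: rest).drop ((c :: rest).take 2).length)
      | none =>
        match (PySem.Dict.mk mapping).get? (String.ofList [c]) with
        | some opts => opts :: pvTokensB mapping rest
        | none => [String.ofList [c]] :: pvTokensB mapping rest
  termination_by t => t.length
  decreasing_by all_goals first
  | (simp [List.length_take]; omega)
  | simp

-- B's pass 2: build all combinations back to front (suffix products)
def pvExpandB (tokens : List (List String)) : List String :=
  tokens.reverse.foldl
    (fun tails options => options.flatMap (fun o => tails.map (fun t => o ++ t))) [""]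

def convert_word_py_alt (word : String) (mapping : List (String × List String)) (exceptions : List (String × List String)) : List String :=
  match (PySem.Dict.mk exceptions).get? word with
  | some v => v
  | none => pvExpandB (pvTokensB mapping word.toList)

-- ===== PRECONDITION & SPEC =====
def Spec_convert_word_py (word : String) (mapping : List (String × List String)) (exceptions : List (String × List String)) (out : List String) : Prop := out = convert_word_py_alt word mapping exceptions
instance (word : String) (mapping : List (String × List String)) (exceptions : List (String × List String)) (out : List String) : Decidable (Spec_convert_word_py word mapping exceptions out) := by unfold Spec_convert_word_py; infer_instance

-- ===== CLAIM (what is proved, stated in full; the proofs are below) =====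
def Claim_equal_convert_word_py : Prop := ∀ (word : String) (mapping : List (String × List String)) (exceptions : List (String × List String)), Dom_convert_word_py word mapping exceptions → Spec_convert_word_py word mapping exceptions (convert_word_py word mapping exceptions)

-- ===== LEMMAS AND PROOFS =====

-- the reversed-loop expansion satisfies the head-first recurrence used in the induction
theorem pvExpandB_cons (opts : List String) (ts : List (List String)) :
    pvExpandB (opts :: ts)
      = opts.flatMap (fun o => (pvExpandB ts).map (fun t => o ++ t)) := by
  unfold pvExpandB
  rw [List.reverse_cons, List.foldl_append]
  generalize (List.foldl _ [""] ts.reverse) = tails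
  simp

-- B's unrolled tri/duo/uno lookups perform exactly A's candidate-list scan (matched branch)
theorem pvTokensB_of_find_some (mapping : List (String × List String)) (c : Char) (rest : List Char)
    (sub : List Char) (opts : List String)
    (h : pvFindSub mapping (c :: rest) = some (sub, opts)) :
    pvTokensB mapping (c :: rest)
      = opts :: pvTokensB mapping ((c :: rest).drop sub.length) := by
  unfold pvFindSub pvScan pvScan pvScan pvScan at h
  conv_lhs => rw [pvTokensB.eq_2]
  have h1 : (c :: rest).take 1 = [c] := by simp
  cases h3 : (PySem.Dict.mk mapping).get? (String.ofList ((c :: rest).take 3)) with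
  | some o => rw [h3] at h; simp at h; simp [← h.1, ← h.2]
  | none =>
    rw [h3] at h
    cases h2 : (PySem.Dict.mk mapping).get? (String.ofList ((c :: rest).take 2)) with
    | some o => rw [h2] at h; simp at h; simp [← h.1, ← h.2]
    | none =>
      rw [h2, h1] at h
      cases hc : (PySem.Dict.mk mapping).get? (String.ofList [c]) with
      | some o =>
        rw [hc] at h; simp at h
        simp [← h.1, ← h.2]
      | none => rw [hc] at h; simp at h

-- B's unrolled tri/duo/uno lookups perform exactly A's candidate-list scan (no-match branch)
theorem pvTokensB_of_find_none (mapping : List (String × List String)) (c : Char) (rest : List Char)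
    (h : pvFindSub mapping (c :: rest) = none) :
    pvTokensB mapping (c :: rest) = [String.ofList [c]] :: pvTokensB mapping rest := by
  unfold pvFindSub pvScan pvScan pvScan pvScan at h
  conv_lhs => rw [pvTokensB.eq_2]
  have h1 : (c :: rest).take 1 = [c] := by simp
  cases h3 : (PySem.Dict.mk mapping).get? (String.ofList ((c :: rest).take 3)) with
  | some o => rw [h3] at h; simp at h
  | none =>
    rw [h3] at h
    cases h2 : (PySem.Dict.mk mapping).get? (String.ofList ((c :: rest).take 2)) with
    | some o => rw [h2] at h; simp at h
    | none =>
      rw [h2, h1] at h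
      cases hc : (PySem.Dict.mk mapping).get? (String.ofList [c]) with
      | some o => rw [hc] at h; simp at h
      | none => simp

-- A's interleaved loop equals "prefix results, each extended by every suffix combination of B"
theorem pvLoopA_eq (mapping : List (String × List String)) (t : List Char) (results : List String) :
    pvLoopA mapping t results
      = results.flatMap (fun r => (pvExpandB (pvTokensB mapping t)).map (fun e => r ++ e)) := by
  fun_induction pvLoopA mapping t results with
  | case1 results => simp [pvTokensB, pvExpandB]
  | case2 c rest results sub opts h ih =>
    simp only [List.flatMap_subtype, List.unattach_attach] at ih
    rw [ih, pvTokensB_of_find_some mapping c rest sub opts h, pvExpandB_cons]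
    simp [List.flatMap_assoc, List.flatMap_map, List.map_flatMap, List.map_map,
      Function.comp_def, String.append_assoc]
  | case3 c rest results h ih =>
    simp only [List.map_subtype, List.unattach_attach] at ih
    rw [ih, pvTokensB_of_find_none mapping c rest h, pvExpandB_cons]
    simp [List.flatMap_map, List.map_map, Function.comp_def, String.append_assoc]

-- ===== VERDICT (by name: the statement is the Claim_ definition above) =====
theorem convert_word_py_spec : Claim_equal_convert_word_py := by
  intro word mapping exceptions _
  unfold Spec_convert_word_py convert_word_py convert_word_py_alt
  cases (PySem.Dict.mk exceptions).get? word with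
  | some v => rfl
  | none =>
    rw [pvLoopA_eq]
    simp
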